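-- pv_equiv track=rewrite | github.com/IFaTaK/ViraSeqAnalytics | src/align_genome.py | correct_offset
-- ===== SOURCE A (Python) =====
-- def correct_offset(original, readed, reads_length):
--     """
--     Corrects the offset in a read sequence compared to the original sequence.
--
--     Args:
--         original (str): The original DNA sequence.
--         read (str): The read sequence to correct.
--         read_length (int): Length of the reads.
--
--     Returns:
--         str: Corrected read sequence.
--     """
--     res = readed
--     res = 2*res[:min(len(res),len(original))]
--     max_overlap = 0
--     offset = 0
--     for idx in range(reads_length):
--         if original[:idx] in res and idx > max_overlap:
--             offset = res.index(original[:idx])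
--             max_overlap = idx
--     res = res[offset:] + res[:offset]
--     res = res[:len(readed)]
--     return res
-- ===== SOURCE B (Python) =====
-- def correct_offset(original, readed, reads_length):
--     res = 2 * readed[:min(len(readed), len(original))]
--     # P(idx) = original[:idx] in res is monotone decreasing in idx (a prefix of a
--     # substring of res is a substring of res), so binary-search the largest idx
--     # in [0, reads_length-1] with P(idx) instead of scanning all of range(reads_length).
--     lo, hi = 0, reads_length - 1
--     while lo < hi:
--         mid = (lo + hi + 1) // 2
--         if original[:mid] in res:
--             lo = mid
--         else:
--             hi = mid - 1
--     offset = res.index(original[:lo]) if lo > 0 else 0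
--     res = res[offset:] + res[:offset]
--     return res[:len(readed)]
-- ===== Notes on version B (the rewrite author's own statement) =====
-- stated objective: faster
-- what changed: A scans every idx in range(reads_length) testing whether original[:idx] occurs in the doubled read and re-running .index on each improvement; B exploits that the prefix-occurs predicate is monotone in idx and binary-searches the largest such idx, then does a single find.
import Mathlib
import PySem

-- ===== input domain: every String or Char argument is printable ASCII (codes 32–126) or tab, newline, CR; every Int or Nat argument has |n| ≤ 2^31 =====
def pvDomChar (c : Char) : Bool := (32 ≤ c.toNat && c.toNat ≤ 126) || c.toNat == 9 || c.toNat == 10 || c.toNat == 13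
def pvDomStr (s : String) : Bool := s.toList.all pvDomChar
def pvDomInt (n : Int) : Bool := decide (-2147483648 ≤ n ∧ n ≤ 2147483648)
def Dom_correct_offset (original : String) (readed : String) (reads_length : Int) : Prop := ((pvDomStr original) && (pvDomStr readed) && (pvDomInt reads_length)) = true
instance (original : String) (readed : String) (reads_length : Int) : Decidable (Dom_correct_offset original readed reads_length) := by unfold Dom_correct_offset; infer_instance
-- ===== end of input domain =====

-- B replaces A's linear scan over range(reads_length) by a binary search for the largest
-- index whose original-prefix occurs in the doubled read (the predicate is monotone),
-- followed by a single find; objective: faster.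

-- ===== PORT A =====
-- A: res = 2*readed[:min(len(readed),len(original))]; scan idx in range(reads_length),
-- remembering the largest idx whose prefix original[:idx] occurs in res together with
-- its first occurrence index; rotate res by that offset and truncate to len(readed).
def correct_offset (original : String) (readed : String) (reads_length : Int) : String :=
  let o := original.toList
  let r := readed.toList
  let res0 := PySem.List.slice r none (some (min (r.length : Int) (o.length : Int)))
  let res := res0 ++ res0
  let st := (PySem.List.pyRange 0 reads_length 1).foldl
    (fun (s : Int × Int) idx =>
      if PySem.Chars.isIn (PySem.List.slice o none (some idx)) res = true ∧ s.1 < idx then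
        (idx, PySem.Chars.find res (PySem.List.slice o none (some idx)))
      else s)
    (0, 0)  -- s = (max_overlap, offset)
  let res2 := PySem.List.slice res (some st.2) none ++ PySem.List.slice res none (some st.2)
  String.ofList (PySem.List.slice res2 none (some (r.length : Int)))

-- ===== PORT B =====
-- B-side helper: the while-loop 'while lo < hi: mid = (lo+hi+1)//2; …' of Source B.
def bsearchLoop (o res : List Char) (lo hi : Int) : Int :=
  if h : lo < hi then
    let mid := PySem.Int.floordiv (lo + hi + 1) 2
    if PySem.Chars.isIn (PySem.List.slice o none (some mid)) res = true then
      bsearchLoop o res mid hi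
    else
      bsearchLoop o res lo (mid - 1)
  else lo
termination_by (hi - lo).toNat
decreasing_by
  · have := PySem.Int.floordiv_two_mid_bounds (lo := lo + 1) (hi := hi) (by omega)
    simp only [mid] at *
    have heq : lo + hi + 1 = lo + 1 + hi := by ring
    rw [heq]; omega
  · have := PySem.Int.floordiv_two_mid_bounds (lo := lo + 1) (hi := hi) (by omega)
    simp only [mid] at *
    have heq : lo + hi + 1 = lo + 1 + hi := by ring
    rw [heq]; omega

def correct_offset_alt (original : String) (readed : String) (reads_length : Int) : String :=
  let o := original.toList
  let r := readed.toList
  let res0 := PySem.List.slice r none (some (min (r.length : Int) (o.length : Int)))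
  let res := res0 ++ res0
  let lo := bsearchLoop o res 0 (reads_length - 1)
  let offset : Int :=
    if 0 < lo then PySem.Chars.find res (PySem.List.slice o none (some lo)) else 0
  let res2 := PySem.List.slice res (some offset) none ++ PySem.List.slice res none (some offset)
  String.ofList (PySem.List.slice res2 none (some (r.length : Int)))

-- ===== PRECONDITION & SPEC =====
def Spec_correct_offset (original : String) (readed : String) (reads_length : Int) (out : String) : Prop := out = correct_offset_alt original readed reads_length
instance (original : String) (readed : String) (reads_length : Int) (out : String) : Decidable (Spec_correct_offset original readed reads_length out) := by unfold Spec_correct_offset; infer_instance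

-- ===== CLAIM (what is proved, stated in full; the proofs are below) =====
def Claim_equal_correct_offset : Prop := ∀ (original : String) (readed : String) (reads_length : Int), Dom_correct_offset original readed reads_length → Spec_correct_offset original readed reads_length (correct_offset original readed reads_length)

-- ===== LEMMAS AND PROOFS =====

-- 'best o res n' = the value of A's max_overlap after scanning idx in range(n).
def best (o res : List Char) : Nat → Nat
  | 0 => 0
  | n + 1 => if n ≠ 0 ∧ PySem.Chars.isIn (o.take n) res = true then n else best o res n

theorem best_lt (o res : List Char) (n : Nat) (hn : 0 < n) : best o res n < n := by
  induction n with
  | zero => omega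
  | succ m ih =>
    simp only [best]
    split
    · omega
    · rcases Nat.eq_zero_or_pos m with hm | hm
      · subst hm; simp [best]
      · exact Nat.lt_succ_of_lt (ih hm)

-- uniqueness: any r < n with the prefix property at r and no larger index below n is best n
theorem best_eq_of (o res : List Char) (n r : Nat) (hr : r < n)
    (hP : r ≠ 0 → PySem.Chars.isIn (o.take r) res = true)
    (hA : ∀ j, r < j → j < n → PySem.Chars.isIn (o.take j) res = true → False) :
    best o res n = r := by
  induction n with
  | zero => omega
  | succ m ih =>
    simp only [best]
    rcases Nat.lt_or_ge r m with hrm | hrm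
    · have hnot : ¬ (m ≠ 0 ∧ PySem.Chars.isIn (o.take m) res = true) := by
        rintro ⟨-, h⟩; exact hA m hrm (Nat.lt_succ_self m) h
      rw [if_neg hnot]
      exact ih hrm (fun j h1 h2 h3 => hA j h1 (Nat.lt_succ_of_lt h2) h3)
    · have : r = m := by omega
      subst this
      rcases Nat.eq_zero_or_pos r with hz | hz
      · subst hz; simp [best]
      · rw [if_pos ⟨by omega, hP (by omega)⟩]

-- A's loop over range(n) computes (best n, its first-occurrence offset).
theorem loopA_eq (o res : List Char) (n : Nat) :
    (PySem.List.pyRange 0 (n : Int) 1).foldl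
      (fun (s : Int × Int) idx =>
        if PySem.Chars.isIn (PySem.List.slice o none (some idx)) res = true ∧ s.1 < idx then
          (idx, PySem.Chars.find res (PySem.List.slice o none (some idx)))
        else s)
      (0, 0)
    = ((best o res n : Int),
        if best o res n ≠ 0 then PySem.Chars.find res (o.take (best o res n)) else 0) := by
  induction n with
  | zero => simp [PySem.List.pyRange_one_eq_nil, best]
  | succ n ih =>
    have hcast : ((n + 1 : Nat) : Int) = (n : Int) + 1 := by push_cast; ring
    rw [hcast, PySem.List.pyRange_one_succ_right (by positivity), List.foldl_append, ih]
    simp only [List.foldl_cons, List.foldl_nil, PySem.List.slice_to_natCast]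
    rcases Nat.eq_zero_or_pos n with h0 | h0
    · subst h0; simp [best]
    · by_cases hin : PySem.Chars.isIn (o.take n) res = true
      · have hblt : best o res n < n := best_lt o res n h0
        rw [if_pos ⟨hin, by exact_mod_cast hblt⟩]
        have hb : best o res (n+1) = n := by simp [best, hin]; omega
        simp [hb]; omega
      · rw [if_neg (by tauto)]
        have hb : best o res (n+1) = best o res n := by simp [best, hin]
        simp [hb]

-- the prefix-occurs predicate is monotone (downward closed)
theorem isIn_slice_mono (o res : List Char) {i j : Int} (h0 : 0 ≤ i) (hij : i ≤ j)
    (h : PySem.Chars.isIn (PySem.List.slice o none (some j)) res = true) :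
    PySem.Chars.isIn (PySem.List.slice o none (some i)) res = true := by
  rw [PySem.List.slice_to (xs := o) (b := j) (by omega)] at h
  rw [PySem.List.slice_to (xs := o) (b := i) h0]
  rw [PySem.Chars.isIn_iff_infix] at h ⊢
  have hpre : o.take i.toNat <+: o.take j.toNat := by
    have heq : (o.take j.toNat).take i.toNat = o.take i.toNat := by
      rw [List.take_take]; congr 1; omega
    simpa [heq] using List.take_prefix i.toNat (o.take j.toNat)
  exact hpre.isInfix.trans h

-- the binary-search loop returns the largest index in [lo, hi] whose prefix occurs in res
theorem bsearchLoop_spec (o res : List Char) (lo hi : Int)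
    (h0 : 0 ≤ lo) (hle : lo ≤ hi)
    (hP : PySem.Chars.isIn (PySem.List.slice o none (some lo)) res = true) :
    lo ≤ bsearchLoop o res lo hi ∧ bsearchLoop o res lo hi ≤ hi ∧
    PySem.Chars.isIn (PySem.List.slice o none (some (bsearchLoop o res lo hi))) res = true ∧
    ∀ j : Int, bsearchLoop o res lo hi < j → j ≤ hi →
      PySem.Chars.isIn (PySem.List.slice o none (some j)) res = true → False := by
  induction lo, hi using bsearchLoop.induct o res with
  | case1 lo hi h mid hin ih =>
    have hmdef : mid = PySem.Int.floordiv (lo + hi + 1) 2 := rfl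
    have hmidb : lo + 1 ≤ mid ∧ mid ≤ hi := by
      rw [hmdef, show lo + hi + 1 = lo + 1 + hi by ring]
      exact PySem.Int.floordiv_two_mid_bounds (by omega)
    rw [bsearchLoop, dif_pos h]
    rw [show PySem.Int.floordiv (lo + hi + 1) 2 = mid from hmdef.symm]
    rw [if_pos hin]
    obtain ⟨a, b, c, d⟩ := ih (by omega) (by omega) hin
    exact ⟨by omega, b, c, d⟩
  | case2 lo hi h mid hin ih =>
    have hmdef : mid = PySem.Int.floordiv (lo + hi + 1) 2 := rfl
    have hmidb : lo + 1 ≤ mid ∧ mid ≤ hi := by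
      rw [hmdef, show lo + hi + 1 = lo + 1 + hi by ring]
      exact PySem.Int.floordiv_two_mid_bounds (by omega)
    rw [bsearchLoop, dif_pos h]
    rw [show PySem.Int.floordiv (lo + hi + 1) 2 = mid from hmdef.symm]
    rw [if_neg (by simpa using hin)]
    obtain ⟨a, b, c, d⟩ := ih h0 (by omega) hP
    refine ⟨a, by omega, c, ?_⟩
    intro j hj1 hj2 hj3
    by_cases hjm : j ≤ mid - 1
    · exact d j hj1 hjm hj3
    · exact absurd (isIn_slice_mono o res (by omega) (by omega : mid ≤ j) hj3) (by simpa using hin)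
  | case3 lo hi h =>
    rw [bsearchLoop, dif_neg h]
    exact ⟨le_refl _, hle, hP, fun j hj1 hj2 _ => by omega⟩

-- the two offsets agree
theorem offset_eq (o res : List Char) (reads_length : Int) :
    ((PySem.List.pyRange 0 reads_length 1).foldl
      (fun (s : Int × Int) idx =>
        if PySem.Chars.isIn (PySem.List.slice o none (some idx)) res = true ∧ s.1 < idx then
          (idx, PySem.Chars.find res (PySem.List.slice o none (some idx)))
        else s)
      (0, 0)).2
    = (if 0 < bsearchLoop o res 0 (reads_length - 1) then
        PySem.Chars.find res
          (PySem.List.slice o none (some (bsearchLoop o res 0 (reads_length - 1))))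
      else 0) := by
  by_cases hle : reads_length ≤ 0
  · rw [PySem.List.pyRange_one_eq_nil hle]
    have hb : bsearchLoop o res 0 (reads_length - 1) = 0 := by
      rw [bsearchLoop, dif_neg (by omega)]
    simp [hb]
  · have hpos : 0 < reads_length := by omega
    set n : Nat := reads_length.toNat with hn
    have hrl : reads_length = (n : Int) := by omega
    have hP0 : PySem.Chars.isIn (PySem.List.slice o none (some 0)) res = true := by
      rw [PySem.List.slice_to (xs := o) (b := 0) le_rfl]
      simp [PySem.Chars.isIn_nil]
    obtain ⟨a, b, c, d⟩ :=
      bsearchLoop_spec o res 0 (reads_length - 1) le_rfl (by omega) hP0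
    set L : Int := bsearchLoop o res 0 (reads_length - 1) with hL
    have hbest : best o res n = L.toNat := by
      apply best_eq_of
      · omega
      · intro hne
        rw [← PySem.List.slice_to (xs := o) (b := L) (by omega)]
        exact c
      · intro j h1 h2 h3
        apply d (j : Int) (by omega) (by omega)
        rw [PySem.List.slice_to_natCast]
        exact h3
    rw [hrl, loopA_eq o res n]
    have hLslice : PySem.List.slice o none (some L) = o.take L.toNat :=
      PySem.List.slice_to (xs := o) (b := L) (by omega)
    simp only [hbest, hLslice]
    by_cases hz : L.toNat = 0
    · simp [hz, show ¬ (0 < L) by omega]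
    · simp [hz, show 0 < L by omega]

-- ===== VERDICT (by name: the statement is the Claim_ definition above) =====
theorem correct_offset_spec : Claim_equal_correct_offset := by
  intro original readed reads_length _
  show correct_offset original readed reads_length = correct_offset_alt original readed reads_length
  simp only [correct_offset, correct_offset_alt]
  rw [offset_eq]
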